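-- pv_equiv track=rewrite | github.com/weiyangzen/awesome_algorithms | Algorithms/计算机-操作系统-0342-文件系统_-_NTFS/demo.py | encode_runlist_delta
-- ===== SOURCE A (Python) =====
-- def encode_runlist_delta(runs: list[tuple[int, int]]) -> str:
--     """
--     Encode runs as: length:delta|length:delta...
--     delta is relative to previous run start LCN, matching NTFS delta idea.
--     """
--     prev_lcn = 0
--     tokens: list[str] = []
--     for start, length in runs:
--         delta = start - prev_lcn
--         tokens.append(f"{length}:{delta}")
--         prev_lcn = start
--     return "|".join(tokens)
-- ===== SOURCE B (Python) =====
-- def encode_runlist_delta(runs: list[tuple[int, int]]) -> str: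
--     """Structural recursion: build the encoding back-to-front directly, no token
--     list and no join -- each call emits its own token and glues '|' before the
--     recursively-encoded tail."""
--     def rec(prev: int, rs: list[tuple[int, int]]) -> str:
--         start, length = rs[0]
--         tok = f"{length}:{start - prev}"
--         if len(rs) == 1:
--             return tok
--         return tok + "|" + rec(start, rs[1:])
--     return rec(0, runs) if runs else ""
-- ===== Notes on version B (the rewrite author's own statement) =====
-- stated objective: alternative
-- what changed: Replaces the imperative accumulate-tokens-then-join loop with direct structural recursion that threads the previous start as a parameter and concatenates each token with '|' onto the recursively encoded tail, never materialising a token list.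
import Mathlib
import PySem

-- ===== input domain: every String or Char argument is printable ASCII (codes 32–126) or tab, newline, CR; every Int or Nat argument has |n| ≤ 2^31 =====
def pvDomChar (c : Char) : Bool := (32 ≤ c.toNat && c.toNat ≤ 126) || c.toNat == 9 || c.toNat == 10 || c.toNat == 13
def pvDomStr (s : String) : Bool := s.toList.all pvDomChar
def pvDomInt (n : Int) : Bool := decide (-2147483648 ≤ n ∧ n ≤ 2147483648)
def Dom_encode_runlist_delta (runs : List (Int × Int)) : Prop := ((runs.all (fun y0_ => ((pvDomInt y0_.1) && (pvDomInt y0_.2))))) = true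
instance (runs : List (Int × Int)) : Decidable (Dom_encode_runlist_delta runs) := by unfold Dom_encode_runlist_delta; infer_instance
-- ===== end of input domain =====

-- B replaces A's accumulate-tokens-then-join loop with direct structural recursion that builds the string back-to-front (alternative decomposition, same cost).


-- ===== PORT A =====
-- token f"{length}:{delta}" as a list of chars (exact: PySem.Int.toChars = str(n))
def pvTokA (length delta : Int) : List Char :=
  PySem.Int.toChars length ++ ':' :: PySem.Int.toChars delta

-- A's loop: state (prev_lcn, tokens), appending one token per run
def pvLoopA (runs : List (Int × Int)) (st : Int × List (List Char)) : Int × List (List Char) :=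
  runs.foldl (fun st p => (p.1, st.2 ++ [pvTokA p.2 (p.1 - st.1)])) st

def encode_runlist_delta (runs : List (Int × Int)) : String :=
  String.mk (PySem.Chars.join ['|'] (pvLoopA runs (0, [])).2)

-- ===== PORT B =====
-- B's rec: emits its own token and glues '|' before the recursively encoded tail;
-- rec is only called on nonempty lists (the [] branch is unreachable in Source B).
def pvRecB (prev : Int) : List (Int × Int) → List Char
  | [] => []
  | [p] => PySem.Int.toChars p.2 ++ ':' :: PySem.Int.toChars (p.1 - prev)
  | p :: tl =>
      (PySem.Int.toChars p.2 ++ ':' :: PySem.Int.toChars (p.1 - prev)) ++ '|' :: pvRecB p.1 tl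

def encode_runlist_delta_alt (runs : List (Int × Int)) : String :=
  if runs.isEmpty then "" else String.mk (pvRecB 0 runs)

-- ===== PRECONDITION & SPEC =====
def Spec_encode_runlist_delta (runs : List (Int × Int)) (out : String) : Prop := out = encode_runlist_delta_alt runs
instance (runs : List (Int × Int)) (out : String) : Decidable (Spec_encode_runlist_delta runs out) := by unfold Spec_encode_runlist_delta; infer_instance

-- ===== CLAIM (what is proved, stated in full; the proofs are below) =====
def Claim_equal_encode_runlist_delta : Prop := ∀ (runs : List (Int × Int)), Dom_encode_runlist_delta runs → Spec_encode_runlist_delta runs (encode_runlist_delta runs)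

-- ===== LEMMAS AND PROOFS =====
-- proof-only helper: the token a run (start,length) with predecessor start p yields
def pvTokP (p : (Int × Int) × Int) : List Char :=
  PySem.Int.toChars p.1.2 ++ ':' :: PySem.Int.toChars (p.1.1 - p.2)

lemma pvLoop_eq_zip (runs : List (Int × Int)) (p0 : Int) (acc : List (List Char)) :
    (pvLoopA runs (p0, acc)).2 = acc ++ (runs.zip (p0 :: runs.map Prod.fst)).map pvTokP := by
  induction runs generalizing p0 acc with
  | nil => simp [pvLoopA]
  | cons hd tl ih =>
    simp only [pvLoopA, List.foldl_cons] at *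
    rw [ih hd.1 (acc ++ [pvTokA hd.2 (hd.1 - p0)])]
    simp [pvTokA, pvTokP]

lemma join_zip_eq_rec (runs : List (Int × Int)) (p0 : Int) (h : runs ≠ []) :
    PySem.Chars.join ['|'] ((runs.zip (p0 :: runs.map Prod.fst)).map pvTokP) = pvRecB p0 runs := by
  induction runs generalizing p0 with
  | nil => exact absurd rfl h
  | cons hd tl ih =>
    cases tl with
    | nil => simp [pvRecB, pvTokP, PySem.Chars.join_singleton]
    | cons hd2 tl2 =>
      have := ih (p0 := hd.1) (by simp)
      simp only [List.map_cons, List.zip_cons_cons] at this ⊢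
      rw [PySem.Chars.join_cons_cons, this]
      simp [pvRecB, pvTokP]

-- ===== VERDICT (by name: the statement is the Claim_ definition above) =====
theorem encode_runlist_delta_spec : Claim_equal_encode_runlist_delta := by
  intro runs _
  unfold Spec_encode_runlist_delta encode_runlist_delta encode_runlist_delta_alt
  cases runs with
  | nil => simp [pvLoopA, PySem.Chars.join_nil]; rfl
  | cons hd tl =>
    rw [pvLoop_eq_zip, List.nil_append, join_zip_eq_rec (hd :: tl) 0 (by simp)]
    simp
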